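-- pv_equiv track=rewrite | github.com/barszu/WDI | wdi 3/zad21_chyba_ok.py | mask_gen_3
-- ===== SOURCE A (Python) =====
-- def mask_gen_3(lenth):
--
--     def bins(num , lenth ):
--         #returns binary representation with 0 in front of to fullfill
--         bins = ""
--         while num != 0:
--             bins += str( num%3 )
--             num = num//3
--
--         bins = bins[::-1]
--         while len(bins) < lenth :
--             bins = "0" + bins
--         return bins
--
--     mask_list = [bins(i , lenth) for i in range(3*(lenth))]
--     return mask_list
-- ===== SOURCE B (Python) =====
-- def mask_gen_3(lenth):
--     # Odometer: keep base-3 digits (least-significant first) and increment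
--     # with carry each step, instead of converting every integer from scratch.
--     digits = [0] * max(lenth, 0)
--     out = []
--     for _ in range(3 * lenth):
--         out.append(''.join(str(d) for d in reversed(digits)))
--         i = 0
--         while i < len(digits):
--             digits[i] += 1
--             if digits[i] < 3:
--                 break
--             digits[i] = 0
--             i += 1
--     return out
-- ===== Notes on version B (the rewrite author's own statement) =====
-- stated objective: alternative
-- what changed: B replaces A's per-integer divmod conversion and string padding by a single odometer: a fixed-width base-3 digit array initialized to zeros that is emitted and then incremented with carry once per step.
import Mathlib
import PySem

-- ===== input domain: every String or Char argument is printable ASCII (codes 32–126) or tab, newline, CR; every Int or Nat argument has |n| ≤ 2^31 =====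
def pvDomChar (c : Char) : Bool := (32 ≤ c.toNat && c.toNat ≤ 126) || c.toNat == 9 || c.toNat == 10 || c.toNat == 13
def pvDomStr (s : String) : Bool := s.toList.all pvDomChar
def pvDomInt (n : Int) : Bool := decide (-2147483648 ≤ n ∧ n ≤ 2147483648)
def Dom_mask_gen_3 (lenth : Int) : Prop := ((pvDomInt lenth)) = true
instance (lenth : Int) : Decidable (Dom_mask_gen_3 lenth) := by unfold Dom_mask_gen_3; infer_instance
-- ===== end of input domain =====

-- B replaces A's per-integer base-3 conversion by a single odometer that increments a
-- digit array with carry each step (objective: alternative decomposition, same cost).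

-- ===== PORT A =====
-- bins's first while loop: bins += str(num % 3); num = num // 3   (only reached with num ≥ 0;
-- for num < 0 the Python loop would never terminate, we return the accumulator there, unreached)
def pvBinsLoop (num : Int) (b : List Char) : List Char :=
  if num = 0 then b
  else if num < 0 then b
  else pvBinsLoop (PySem.Int.floordiv num 3) (b ++ PySem.Int.toChars (PySem.Int.mod num 3))
termination_by num.toNat
decreasing_by
  rw [PySem.Int.floordiv_eq_ediv_of_pos (by omega : (0:Int) < 3)]
  omega

-- bins's second while loop: while len(bins) < lenth: bins = "0" + bins
def pvPadLoop (b : List Char) (lenth : Int) : List Char :=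
  if (b.length : Int) < lenth then pvPadLoop ('0' :: b) lenth else b
termination_by (lenth - b.length).toNat
decreasing_by simp; omega

def pvBins (num lenth : Int) : String :=
  let b := pvBinsLoop num []
  let b := b.reverse            -- bins = bins[::-1]
  String.ofList (pvPadLoop b lenth)

def mask_gen_3 (lenth : Int) : List String :=
  (PySem.List.pyRange 0 (3 * lenth) 1).map (fun i => pvBins i lenth)

-- ===== PORT B =====
-- the inner carry loop of Source B, on the least-significant-first digit list
def pvInc3 : List Int → List Int
  | [] => []
  | d :: rest => if d + 1 < 3 then (d + 1) :: rest else 0 :: pvInc3 rest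

-- ''.join(str(d) for d in reversed(digits))
def pvJoin (digits : List Int) : String :=
  String.ofList (digits.reverse.flatMap (fun d => PySem.Int.toChars d))

def mask_gen_3_alt (lenth : Int) : List String :=
  ((PySem.List.pyRange 0 (3 * lenth) 1).foldl
    (fun (st : List Int × List String) _ => (pvInc3 st.1, st.2 ++ [pvJoin st.1]))
    (List.replicate lenth.toNat 0, [])).2

-- ===== PRECONDITION & SPEC =====
def Spec_mask_gen_3 (lenth : Int) (out : List String) : Prop := out = mask_gen_3_alt lenth
instance (lenth : Int) (out : List String) : Decidable (Spec_mask_gen_3 lenth out) := by unfold Spec_mask_gen_3; infer_instance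

-- ===== CLAIM (what is proved, stated in full; the proofs are below) =====
def Claim_equal_mask_gen_3 : Prop := ∀ (lenth : Int), Dom_mask_gen_3 lenth → Spec_mask_gen_3 lenth (mask_gen_3 lenth)

-- ===== LEMMAS AND PROOFS =====

-- minimal base-3 digits of a Nat, least significant first ([] for 0)
def nLsb : Nat → List Nat
  | 0 => []
  | k + 1 => ((k + 1) % 3) :: nLsb ((k + 1) / 3)
decreasing_by omega

-- fixed-width base-3 digits as Ints, least significant first (B's odometer state)
def iDigs : Nat → Nat → List Int
  | 0, _ => []
  | L + 1, k => ((k % 3 : Nat) : Int) :: iDigs L (k / 3)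

def cdig (m : Nat) : Char := if m = 0 then '0' else if m = 1 then '1' else '2'

lemma nLsb_pos (k : Nat) (h : 0 < k) : nLsb k = (k % 3) :: nLsb (k / 3) := by
  cases k with
  | zero => omega
  | succ n => rw [nLsb]

lemma toChars_lt3 (m : Nat) (h : m < 3) : PySem.Int.toChars (m : Int) = [cdig m] := by
  interval_cases m <;> decide

lemma iDigs_zero (L : Nat) : iDigs L 0 = List.replicate L 0 := by
  induction L with
  | zero => rfl
  | succ L ih => simp [iDigs, ih, List.replicate_succ]

lemma iDigs_length (L k : Nat) : (iDigs L k).length = L := by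
  induction L generalizing k with
  | zero => rfl
  | succ L ih => simp [iDigs, ih]

lemma pvInc3_cons (d : Int) (rest : List Int) :
    pvInc3 (d :: rest) = if d + 1 < 3 then (d + 1) :: rest else 0 :: pvInc3 rest := rfl

lemma inc3_iDigs (L k : Nat) : pvInc3 (iDigs L k) = iDigs L (k + 1) := by
  induction L generalizing k with
  | zero => rfl
  | succ L ih =>
    simp only [iDigs, pvInc3_cons]
    by_cases h : k % 3 = 2
    · have h1 : (k + 1) % 3 = 0 := by omega
      have h2 : (k + 1) / 3 = k / 3 + 1 := by omega
      rw [if_neg (by push_cast; omega), h1, h2, ih]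
      norm_num
    · have h1 : (k + 1) % 3 = k % 3 + 1 := by omega
      have h2 : (k + 1) / 3 = k / 3 := by omega
      rw [if_pos (by push_cast; omega), h1, h2]
      push_cast
      ring_nf

-- the main loop of B: after consuming any list, state and output are as described
lemma foldl_odometer (L : Nat) (l : List Int) : ∀ (k : Nat) (out : List String),
    l.foldl (fun (st : List Int × List String) _ => (pvInc3 st.1, st.2 ++ [pvJoin st.1]))
      (iDigs L k, out)
    = (iDigs L (k + l.length),
       out ++ (List.range l.length).map (fun j => pvJoin (iDigs L (k + j)))) := by
  induction l with
  | nil => simp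
  | cons a l ih =>
    intro k out
    rw [List.foldl_cons]
    show List.foldl _ (pvInc3 _, out ++ [pvJoin _]) l = _
    rw [inc3_iDigs, ih (k + 1)]
    rw [List.length_cons, List.range_succ_eq_map, List.map_cons, List.map_map]
    simp only [Prod.mk.injEq]
    constructor
    · have e : k + 1 + l.length = k + (l.length + 1) := by omega
      rw [e]
    · rw [List.append_assoc, List.singleton_append]
      simp only [Nat.add_zero, Function.comp_def]
      congr 1
      congr 1
      apply List.map_congr_left
      intro j hj
      have e : k + 1 + j = k + (j + 1) := by omega
      rw [e]

-- A's conversion loop appends the minimal digit characters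
lemma binsLoop_eq (k : Nat) : ∀ b : List Char,
    pvBinsLoop (k : Int) b = b ++ (nLsb k).map cdig := by
  induction k using Nat.strong_induction_on with
  | _ k ih =>
    intro b
    cases k with
    | zero => simp [pvBinsLoop, nLsb]
    | succ n =>
      rw [pvBinsLoop]
      have hpos : ¬ ((n + 1 : Nat) : Int) = 0 := by omega
      have hneg : ¬ ((n + 1 : Nat) : Int) < 0 := by omega
      rw [if_neg hpos, if_neg hneg]
      have hm : PySem.Int.mod ((n + 1 : Nat) : Int) 3 = (((n + 1) % 3 : Nat) : Int) := by
        exact_mod_cast PySem.Int.mod_natCast (n + 1) 3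
      have hd : PySem.Int.floordiv ((n + 1 : Nat) : Int) 3 = (((n + 1) / 3 : Nat) : Int) := by
        exact_mod_cast PySem.Int.floordiv_natCast (n + 1) 3
      rw [hm, hd, ih ((n + 1) / 3) (by omega)]
      rw [nLsb_pos (n + 1) (by omega)]
      rw [toChars_lt3 _ (by omega)]
      simp

-- the padding loop prepends '0' up to width lenth.toNat
lemma padLoop_eq (lenth : Int) : ∀ (n : Nat) (b : List Char), b.length + n = lenth.toNat →
    pvPadLoop b lenth = List.replicate n '0' ++ b := by
  intro n
  induction n with
  | zero =>
    intro b hb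
    rw [pvPadLoop, if_neg (by omega)]
    simp
  | succ n ih =>
    intro b hb
    rw [pvPadLoop, if_pos (by omega)]
    rw [ih ('0' :: b) (by simp; omega)]
    rw [List.replicate_succ']
    simp

lemma three_mul_le_pow (L : Nat) (h : 1 ≤ L) : 3 * L ≤ 3 ^ L := by
  obtain ⟨m, rfl⟩ : ∃ m, L = m + 1 := ⟨L - 1, by omega⟩
  have hm : m + 1 ≤ 3 ^ m := Nat.lt_pow_self (by omega)
  calc 3 * (m + 1) ≤ 3 * 3 ^ m := Nat.mul_le_mul_left 3 hm
  _ = 3 ^ (m + 1) := by ring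

-- padded fixed-width digits = minimal digits followed by zeros
lemma iDigs_split (L k : Nat) (h : k < 3 ^ L) :
    iDigs L k = (nLsb k).map (fun (m : Nat) => (m : Int)) ++ List.replicate (L - (nLsb k).length) 0 := by
  induction L generalizing k with
  | zero =>
    have : k = 0 := by simpa using h
    subst this
    simp [iDigs, nLsb]
  | succ L ih =>
    rcases Nat.eq_zero_or_pos k with rfl | hk
    · rw [iDigs_zero]
      simp [nLsb, List.replicate_succ]
    · have hdiv : k / 3 < 3 ^ L := by
        rw [Nat.div_lt_iff_lt_mul (by omega)]
        calc k < 3 ^ (L + 1) := h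
        _ = 3 ^ L * 3 := by ring
      rw [iDigs, ih _ hdiv, nLsb_pos k hk]
      simp [List.length_cons]

lemma nLsb_length_le (L k : Nat) (h : k < 3 ^ L) : (nLsb k).length ≤ L := by
  have hs := congrArg List.length (iDigs_split L k h)
  simp [iDigs_length] at hs
  omega

lemma nLsb_lt3 (k : Nat) : ∀ m ∈ nLsb k, m < 3 := by
  induction k using Nat.strong_induction_on with
  | _ k ih =>
    cases k with
    | zero => simp [nLsb]
    | succ n =>
      intro m hm
      rw [nLsb] at hm
      rcases List.mem_cons.mp hm with rfl | hm
      · omega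
      · exact ih _ (by omega) _ hm

lemma flatMap_chars (l : List Nat) (h : ∀ m ∈ l, m < 3) :
    (l.map (fun (m : Nat) => (m : Int))).flatMap (fun d => PySem.Int.toChars d) = l.map cdig := by
  induction l with
  | nil => rfl
  | cons a l ih =>
    simp only [List.map_cons, List.flatMap_cons]
    rw [toChars_lt3 a (h a (by simp)), ih (fun m hm => h m (by simp [hm]))]
    rfl

lemma flatMap_zeros (n : Nat) :
    (List.replicate n (0 : Int)).flatMap (fun d => PySem.Int.toChars d) = List.replicate n '0' := by
  induction n with
  | zero => rfl
  | succ n ih =>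
    rw [List.replicate_succ, List.flatMap_cons, ih, List.replicate_succ]
    rfl

-- pointwise: A's padded conversion equals B's rendered fixed-width digits
lemma point_eq (L j : Nat) (hj : j < 3 ^ L) :
    pvBins (j : Int) ((L : Nat) : Int) = pvJoin (iDigs L j) := by
  have hd : (nLsb j).length ≤ L := nLsb_length_le L j hj
  rw [pvBins]
  simp only [binsLoop_eq j [], List.nil_append]
  rw [padLoop_eq ((L : Nat) : Int) (L - (nLsb j).length) (((nLsb j).map cdig).reverse)
    (by simp; omega)]
  rw [pvJoin, iDigs_split L j hj]
  rw [List.reverse_append, List.reverse_replicate, List.flatMap_append, flatMap_zeros]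
  have hB : (List.map (fun (m : Nat) => (m : Int)) (nLsb j)).reverse
      = List.map (fun (m : Nat) => (m : Int)) (nLsb j).reverse := by simp
  rw [hB, flatMap_chars _ (fun m hm => nLsb_lt3 j m (List.mem_reverse.mp hm))]
  simp [List.map_reverse]

lemma pyRange_nonpos (m : Int) (h : m ≤ 0) : PySem.List.pyRange 0 m 1 = [] := by
  simp [PySem.List.pyRange]; omega

-- ===== VERDICT (by name: the statement is the Claim_ definition above) =====
theorem mask_gen_3_spec : Claim_equal_mask_gen_3 := by
  intro lenth _
  unfold Spec_mask_gen_3 mask_gen_3 mask_gen_3_alt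
  by_cases h : lenth ≤ 0
  · rw [pyRange_nonpos _ (by omega)]
    rfl
  · have hL1 : 1 ≤ lenth.toNat := by omega
    set L := lenth.toNat with hLdef
    have hlen : lenth = (L : Int) := by omega
    have h3 : 3 * lenth = ((3 * L : Nat) : Int) := by omega
    rw [h3, PySem.List.pyRange_zero_natCast (3 * L)]
    have hinit : List.replicate lenth.toNat (0 : Int) = iDigs L 0 := by
      rw [iDigs_zero]
    rw [hinit, foldl_odometer L _ 0 []]
    simp only [List.length_map, List.length_range, List.map_map, List.nil_append]
    apply List.map_congr_left
    intro j hj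
    simp only [List.mem_range] at hj
    have hjlt : j < 3 ^ L := lt_of_lt_of_le hj (three_mul_le_pow L hL1)
    simp only [Function.comp_apply, Nat.zero_add]
    rw [hlen]
    exact point_eq L j hjlt
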